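-- pv_equiv track=rewrite | github.com/miftaAlam/MachineLearning | utils.py | pixels_of_num
-- ===== SOURCE A (Python) =====
-- def pixels_of_num(remaining):
--     limit = 64
--     at = 0
--     pixels = [[0,0,0]]*64
--     while remaining > 0:
--         if (remaining > limit):
--             pixels[at] = [255,0,0]
--             at = at + 1
--             limit = limit -1
--             remaining = remaining - limit
--         else:
--             pixels[at] = [255,255,255]
--             remaining = remaining -1
--             at = at + 1
--     return pixels
-- ===== SOURCE B (Python) =====
-- def pixels_of_num(remaining):
--     # Closed-form construction: after k red steps A has consumed S(k) = 64k - k(k+1)/2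
--     # of `remaining`; red steps happen exactly while remaining > (64-k) + S(k).
--     # So compute the red count k, the white count w = remaining - S(k), and build
--     # the answer as three replicated blocks.
--     if remaining <= 0:
--         return [[0, 0, 0]] * 64
--     k = 0
--     while k < 64 and remaining > 64 - k + (64 * k - k * (k + 1) // 2):
--         k = k + 1
--     w = remaining - (64 * k - k * (k + 1) // 2)
--     return [[255, 0, 0]] * k + [[255, 255, 255]] * w + [[0, 0, 0]] * (64 - k - w)
-- ===== Notes on version B (the rewrite author's own statement) =====
-- stated objective: alternative
-- what changed: A simulates the loop pixel by pixel with a moving cursor and mutable limit; B computes the red count k arithmetically from the triangular-sum formula S(k)=64k-k(k+1)/2, derives the white count w=remaining-S(k), and builds the 64-entry result as three replicated blocks with no per-pixel state.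
import Mathlib
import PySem

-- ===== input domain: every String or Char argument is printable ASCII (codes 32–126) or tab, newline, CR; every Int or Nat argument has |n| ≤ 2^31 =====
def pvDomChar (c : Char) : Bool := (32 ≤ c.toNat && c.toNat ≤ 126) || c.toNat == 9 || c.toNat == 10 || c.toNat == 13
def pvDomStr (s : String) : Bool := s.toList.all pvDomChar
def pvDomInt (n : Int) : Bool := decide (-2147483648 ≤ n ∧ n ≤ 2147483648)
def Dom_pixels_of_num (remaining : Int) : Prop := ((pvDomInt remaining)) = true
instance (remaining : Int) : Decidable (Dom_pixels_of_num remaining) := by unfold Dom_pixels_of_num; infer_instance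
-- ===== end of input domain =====

-- B replaces A's per-pixel cursor simulation by an arithmetic computation of the red/white
-- counts followed by a three-block replicate construction; objective: alternative.
-- Equivalence is proved on Pre_ (remaining ≤ 2017), the inputs where Python A returns
-- instead of raising IndexError.

-- ===== PORT A =====
-- A's single while loop: state (remaining, limit, at, pixels); 'at' is only ever 0,1,2,…, kept as Nat.
-- The 'at < 64' guard marks where Python's pixels[at] raises IndexError (outside Pre_).
def pixelsLoopA (remaining limit : Int) (i : Nat) (pixels : List (List Int)) : List (List Int) :=
  if remaining > 0 then
    if i < 64 then
      if remaining > limit then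
        pixelsLoopA (remaining - (limit - 1)) (limit - 1) (i + 1) (pixels.set i [255, 0, 0])
      else
        pixelsLoopA (remaining - 1) limit (i + 1) (pixels.set i [255, 255, 255])
    else pixels
  else pixels
termination_by 64 - i
decreasing_by all_goals omega

def pixels_of_num (remaining : Int) : List (List Int) :=
  pixelsLoopA remaining 64 0 (List.replicate 64 [0, 0, 0])

-- ===== PORT B =====
-- B's count-search loop: smallest k (≤ 64) with remaining ≤ 64-k + S(k), S(k) = 64k - k(k+1)/2.
-- k*(k+1) is nonnegative, so Int '/' here agrees with Python's '//'.
def pvRedCount (remaining : Int) (k : Nat) : Nat :=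
  if k < 64 ∧ remaining > 64 - (k : Int) + (64 * (k : Int) - (k : Int) * ((k : Int) + 1) / 2) then
    pvRedCount remaining (k + 1)
  else k
termination_by 64 - k
decreasing_by omega

-- Python's `[x]*n` with negative n is []; Int.toNat clamps the same way.
def pixels_of_num_alt (remaining : Int) : List (List Int) :=
  if remaining ≤ 0 then List.replicate 64 [0, 0, 0]
  else
    let k := pvRedCount remaining 0
    let w : Int := remaining - (64 * (k : Int) - (k : Int) * ((k : Int) + 1) / 2)
    List.replicate k [255, 0, 0] ++ List.replicate w.toNat [255, 255, 255] ++
      List.replicate ((64 - (k : Int) - w).toNat) [0, 0, 0]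

-- ===== PRECONDITION & SPEC =====
-- Pre_ excludes exactly remaining ≥ 2018, where Python's A raises IndexError (pixels[64]).
def Pre_pixels_of_num (remaining : Int) : Prop := remaining ≤ 2017
instance (remaining : Int) : Decidable (Pre_pixels_of_num remaining) := by
  unfold Pre_pixels_of_num; infer_instance

def pvWitness_pixels_of_num : Int := (7)

def Spec_pixels_of_num (remaining : Int) (out : List (List Int)) : Prop := out = pixels_of_num_alt remaining
instance (remaining : Int) (out : List (List Int)) : Decidable (Spec_pixels_of_num remaining out) := by unfold Spec_pixels_of_num; infer_instance

-- ===== CLAIM (what is proved, stated in full; the proofs are below) =====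
def Claim_equal_pixels_of_num : Prop := ∀ (remaining : Int), Dom_pixels_of_num remaining → Pre_pixels_of_num remaining → Spec_pixels_of_num remaining (pixels_of_num remaining)

-- ===== LEMMAS AND PROOFS =====

-- S(k), the amount of `remaining` consumed by the first k red steps, as in the ports.
def pvS (k : Nat) : Int := 64 * (k : Int) - (k : Int) * ((k : Int) + 1) / 2

theorem pvS_succ (j : Nat) : pvS (j + 1) = pvS j + (63 - (j : Int)) := by
  obtain ⟨c, hc⟩ : ∃ c : Int, (j : Int) * ((j : Int) + 1) = 2 * c := by
    rcases Int.even_mul_succ_self (j : Int) with ⟨c, hc⟩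
    exact ⟨c, by omega⟩
  have hc' : ((j + 1 : Nat) : Int) * (((j + 1 : Nat) : Int) + 1) = 2 * (c + (j : Int) + 1) := by
    push_cast; nlinarith [hc]
  unfold pvS
  rw [hc, hc', Int.mul_ediv_cancel_left _ (by norm_num), Int.mul_ediv_cancel_left _ (by norm_num)]
  push_cast; ring

theorem pvRedCount_step (r : Int) (j : Nat) (h : j < 64 ∧ r > 64 - (j : Int) + pvS j) :
    pvRedCount r j = pvRedCount r (j + 1) := by
  rw [pvRedCount]; simp only [pvS] at h; simp [h]

theorem pvRedCount_stop (r : Int) (j : Nat) (h : ¬ (j < 64 ∧ r > 64 - (j : Int) + pvS j)) :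
    pvRedCount r j = j := by
  rw [pvRedCount]; simp only [pvS] at h; simp [h]

-- Closed form of A's loop in the all-white phase (limit no longer binds).
theorem whiteClosed (n : Nat) : ∀ (j : Nat) (r l : Int) (p : List (List Int)),
    p.length = j → 64 - j ≤ n → 0 ≤ r → r ≤ l → r ≤ 64 - (j : Int) →
    pixelsLoopA r l j (p ++ List.replicate (64 - j) [0, 0, 0]) =
      p ++ List.replicate r.toNat [255, 255, 255] ++ List.replicate (64 - j - r.toNat) [0, 0, 0] := by
  induction n with
  | zero =>
    intro j r l p hp hn h0 hrl hcap
    have hj : j = 64 := by omega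
    have hr : r = 0 := by subst hj; push_cast at hcap; omega
    subst hj hr
    rw [pixelsLoopA]; simp
  | succ n ih =>
    intro j r l p hp hn h0 hrl hcap
    rw [pixelsLoopA]
    by_cases hr : r > 0
    · have hj : j < 64 := by
        by_contra h
        have : j = 64 := by omega
        subst this; push_cast at hcap; omega
      have hnr : ¬ r > l := by omega
      simp only [hr, hj, hnr, if_false, if_pos]
      have hm : 64 - j = (64 - (j + 1)) + 1 := by omega
      have hset : (p ++ List.replicate (64 - j) ([0, 0, 0] : List Int)).set j [255, 255, 255]
          = (p ++ [[255, 255, 255]]) ++ List.replicate (64 - (j + 1)) [0, 0, 0] := by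
        rw [hm, List.replicate_succ, List.set_append_right _ _ (by omega)]
        simp [hp]
      rw [hset, ih (j + 1) (r - 1) l (p ++ [[255, 255, 255]]) (by simp [hp]) (by omega)
        (by omega) (by omega) (by push_cast; omega)]
      have hrt : r.toNat = (r - 1).toNat + 1 := by omega
      have hcnt : 64 - (j + 1) - (r - 1).toNat = 64 - j - r.toNat := by omega
      rw [hrt, hcnt, List.replicate_succ]
      simp
      omega
    · have hr0 : r = 0 := by omega
      subst hr0
      simp
-- (whiteClosed's base case: j = 64 forces r = 0.)

-- Main invariant: from the state after j red steps (remaining = r - S j, limit = 64 - j,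
-- first j pixels red), A's loop produces B's three-block closed form.
theorem mainLoop (n : Nat) : ∀ (j : Nat) (r : Int), j ≤ 63 → 64 - j ≤ n →
    0 < r - pvS j → r ≤ 2017 →
    pixelsLoopA (r - pvS j) (64 - (j : Int)) j
        (List.replicate j [255, 0, 0] ++ List.replicate (64 - j) [0, 0, 0]) =
      List.replicate (pvRedCount r j) [255, 0, 0] ++
        List.replicate (r - pvS (pvRedCount r j)).toNat [255, 255, 255] ++
        List.replicate ((64 - (pvRedCount r j : Int) - (r - pvS (pvRedCount r j))).toNat) [0, 0, 0] := by
  induction n with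
  | zero => intro j r hj hn; omega
  | succ n ih =>
    intro j r hj hn hpos hle
    by_cases hred : r - pvS j > 64 - (j : Int)
    · -- red step
      have hk : pvRedCount r j = pvRedCount r (j + 1) := pvRedCount_step r j ⟨by omega, by omega⟩
      -- within Pre_, a red step cannot happen at j = 63 (invariant r ≤ 2017, pvS 63 = 2016)
      have hS63 : pvS 63 = 2016 := by decide
      have hj63 : j < 63 := by
        by_contra h
        have : j = 63 := by omega
        subst this; omega
      rw [pixelsLoopA]
      have h1 : r - pvS j > 0 := hpos
      have h2 : j < 64 := by omega
      simp only [h1, h2, hred, if_pos]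
      have hsucc := pvS_succ j
      have hrem : r - pvS j - (64 - (j : Int) - 1) = r - pvS (j + 1) := by omega
      have hlim : 64 - (j : Int) - 1 = 64 - ((j + 1 : Nat) : Int) := by push_cast; ring
      have hset : (List.replicate j ([255, 0, 0] : List Int) ++
            List.replicate (64 - j) [0, 0, 0]).set j [255, 0, 0]
          = List.replicate (j + 1) [255, 0, 0] ++ List.replicate (64 - (j + 1)) [0, 0, 0] := by
        have hm : 64 - j = (64 - (j + 1)) + 1 := by omega
        rw [hm, List.replicate_succ, List.set_append_right _ _ (by simp),
          List.replicate_succ' (n := j)]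
        simp
      rw [hrem, hlim, hset, ih (j + 1) r (by omega) (by omega) (by omega) hle, hk]
    · -- white phase from here on
      have hk : pvRedCount r j = j := pvRedCount_stop r j (by omega)
      rw [hk]
      have := whiteClosed (n + 1) j (r - pvS j) (64 - (j : Int))
        (List.replicate j [255, 0, 0]) (by simp) hn (by omega) (by omega) (by omega)
      rw [this]
      simp only [List.append_assoc]
      congr 3
      omega

-- ===== VERDICT (by name: the statement is the Claim_ definition above) =====
theorem pixels_of_num_spec : Claim_equal_pixels_of_num := by
  intro r _ hpre
  unfold Spec_pixels_of_num pixels_of_num pixels_of_num_alt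
  by_cases hr : r ≤ 0
  · rw [pixelsLoopA]
    simp [hr, show ¬ r > 0 by omega]
  · have hS0 : pvS 0 = 0 := by decide
    have h := mainLoop 64 0 r (by omega) (by omega) (by simp [hS0]; omega) hpre
    simp only [hS0, Nat.sub_zero, List.replicate_zero, List.nil_append, Nat.cast_zero,
      sub_zero] at h
    simp only [hr, if_false]
    rw [h]
    simp only [pvS]
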